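-- pv_equiv track=rewrite | github.com/LinhNH2003/Rcm_Multi_Critical_Hotel | modules/recommend_amenity_refactored.py | count_number_occurrences
-- ===== SOURCE A (Python) =====
-- from collections import defaultdict
-- from typing import Dict, List, Optional, Tuple, Union, Any
--
-- def count_number_occurrences(data: Dict, selected_numbers: List) -> Tuple[Dict, int]:
--     """Count occurrences of selected numbers in facility data."""
--     number_counts = defaultdict(int)
--
--     for amenities in data["value"].values():
--         if amenities is None:
--             continue
--         for num in amenities:
--             number_counts[num] += 1
--
--     occurrences = dict(number_counts)
--     selected_counts = {num: occurrences.get(num, 0) for num in selected_numbers}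
--     total_count = sum(selected_counts.values())
--
--     return selected_counts, total_count
-- ===== SOURCE B (Python) =====
-- def count_number_occurrences(data, selected_numbers):
--     """Count occurrences of selected numbers by scanning amenity lists once per distinct selected number."""
--     values = data["value"]
--     selected_counts = {}
--     total_count = 0
--     for num in dict.fromkeys(selected_numbers):  # distinct, first-occurrence order
--         c = sum(1 for amenities in values.values() if amenities is not None
--                   for x in amenities if x == num)
--         selected_counts[num] = c
--         total_count += c
--     return selected_counts, total_count
-- ===== Notes on version B (the rewrite author's own statement) =====
-- stated objective: alternative
-- what changed: B drops A's full defaultdict count table: it deduplicates selected_numbers in order and, for each distinct number, counts its occurrences directly across the non-None amenity lists with a running total, never building a counter over all numbers.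
import Mathlib
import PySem

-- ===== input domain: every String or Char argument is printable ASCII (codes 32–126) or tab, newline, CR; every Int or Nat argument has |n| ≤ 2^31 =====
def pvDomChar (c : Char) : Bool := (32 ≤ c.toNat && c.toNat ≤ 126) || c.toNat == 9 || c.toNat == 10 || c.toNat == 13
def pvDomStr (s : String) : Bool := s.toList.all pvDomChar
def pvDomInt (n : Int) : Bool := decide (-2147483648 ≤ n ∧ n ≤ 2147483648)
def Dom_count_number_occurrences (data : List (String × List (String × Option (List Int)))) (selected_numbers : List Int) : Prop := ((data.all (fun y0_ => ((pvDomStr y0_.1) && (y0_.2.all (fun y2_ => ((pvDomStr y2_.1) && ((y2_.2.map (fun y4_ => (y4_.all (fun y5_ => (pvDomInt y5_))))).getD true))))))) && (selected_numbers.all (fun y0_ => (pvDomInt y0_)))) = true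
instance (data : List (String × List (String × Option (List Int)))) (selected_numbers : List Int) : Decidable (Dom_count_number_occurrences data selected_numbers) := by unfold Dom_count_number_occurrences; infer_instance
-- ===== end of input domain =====

-- B replaces A's full defaultdict count table by a per-distinct-selected-number direct count
-- over the amenity lists with a running total (alternative decomposition, same results).


-- ===== PORT A =====
def count_number_occurrences (data : List (String × List (String × Option (List Int)))) (selected_numbers : List Int) : (List (Int × Int)) × Int :=
  match (PySem.Dict.ofList data).get? "value" with
  | none => ([], 0)  -- unreachable under Pre_ (Python raises KeyError)
  | some inner =>
    let number_counts : PySem.Dict Int Int :=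
      (PySem.Dict.ofList inner).values.foldl
        (fun d amenities =>
          match amenities with
          | none => d
          | some ams => ams.foldl (fun d num => d.modify num 0 (· + 1)) d)
        PySem.Dict.empty
    let selected_counts : PySem.Dict Int Int :=
      selected_numbers.foldl (fun d num => d.insert num (number_counts.getD num 0)) PySem.Dict.empty
    (selected_counts.items, selected_counts.values.sum)

-- ===== PORT B =====
-- sum(1 for amenities in values.values() if amenities is not None for x in amenities if x == num)
def pvCountOne (vals : List (Option (List Int))) (num : Int) : Int :=
  vals.foldl
    (fun s amenities =>
      match amenities with
      | none => s
      | some ams => ams.foldl (fun s x => if x == num then s + 1 else s) s)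
    0

def count_number_occurrences_alt (data : List (String × List (String × Option (List Int)))) (selected_numbers : List Int) : (List (Int × Int)) × Int :=
  match (PySem.Dict.ofList data).get? "value" with
  | none => ([], 0)  -- unreachable under Pre_ (Python raises KeyError)
  | some inner =>
    (PySem.List.dedup selected_numbers).foldl
      (fun acc num =>
        let c := pvCountOne (PySem.Dict.ofList inner).values num
        (acc.1 ++ [(num, c)], acc.2 + c))
      ([], 0)

-- ===== PRECONDITION & SPEC =====
-- Pre_ excludes exactly the inputs with no "value" key, on which the Python raises KeyError.
def Pre_count_number_occurrences (data : List (String × List (String × Option (List Int)))) (selected_numbers : List Int) : Prop :=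
  ((PySem.Dict.ofList data).get? "value").isSome = true
instance (data : List (String × List (String × Option (List Int)))) (selected_numbers : List Int) : Decidable (Pre_count_number_occurrences data selected_numbers) := by unfold Pre_count_number_occurrences; infer_instance
def pvWitness_count_number_occurrences : (List (String × List (String × Option (List Int)))) × List Int :=
  ([("value", [("pool", some [1, 2, 2]), ("gym", none)])], [2, 3])

def Spec_count_number_occurrences (data : List (String × List (String × Option (List Int)))) (selected_numbers : List Int) (out : (List (Int × Int)) × Int) : Prop := out = count_number_occurrences_alt data selected_numbers
instance (data : List (String × List (String × Option (List Int)))) (selected_numbers : List Int) (out : (List (Int × Int)) × Int) : Decidable (Spec_count_number_occurrences data selected_numbers out) := by unfold Spec_count_number_occurrences; infer_instance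

-- ===== CLAIM (what is proved, stated in full; the proofs are below) =====
def Claim_equal_count_number_occurrences : Prop := ∀ (data : List (String × List (String × Option (List Int)))) (selected_numbers : List Int), Dom_count_number_occurrences data selected_numbers → Pre_count_number_occurrences data selected_numbers → Spec_count_number_occurrences data selected_numbers (count_number_occurrences data selected_numbers)

-- ===== LEMMAS AND PROOFS =====

-- per-amenity-list contribution of one number
def pvG (num : Int) (amenities : Option (List Int)) : Int :=
  match amenities with
  | none => 0
  | some ams => (ams.count num : Int)

-- B's nested counting fold is the sum of per-list counts.
theorem pvCountOne_eq (vals : List (Option (List Int))) (num : Int) :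
    pvCountOne vals num = (vals.map (pvG num)).sum := by
  unfold pvCountOne
  have h : (fun (s : Int) (amenities : Option (List Int)) =>
      match amenities with
      | none => s
      | some ams => ams.foldl (fun s x => if x == num then s + 1 else s) s)
      = (fun s amenities => s + pvG num amenities) := by
    funext s amenities
    cases amenities with
    | none => simp [pvG]
    | some ams =>
      have hb := PySem.List.foldl_beq_add_one (l := ams) (v := num) (a := s)
      simpa [pvG] using hb
  rw [h, PySem.List.foldl_add]
  simp

-- A's counter loop, read back at any key, is the same sum of per-list counts.
theorem counterA_getD (vals : List (Option (List Int))) (d : PySem.Dict Int Int) (num : Int) :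
    (vals.foldl
      (fun d amenities =>
        match amenities with
        | none => d
        | some ams => ams.foldl (fun d n => d.modify n 0 (· + 1)) d)
      d).getD num 0
    = d.getD num 0 + (vals.map (pvG num)).sum := by
  induction vals generalizing d with
  | nil => simp
  | cons a rest ih =>
    cases a with
    | none => simp [List.foldl_cons, ih, pvG]
    | some ams =>
      simp only [List.foldl_cons, List.map_cons, List.sum_cons]
      rw [ih, PySem.Dict.getD_foldl_modify_add_one]
      simp [pvG]; ring

-- A's insert loop over sel produces exactly one item per distinct selected number, in order.
theorem items_foldl_insert_fn (F : Int → Int) (sel : List Int) :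
    (sel.foldl (fun d n => d.insert n (F n)) PySem.Dict.empty).items
      = (PySem.List.dedup sel).map (fun n => (n, F n)) := by
  induction sel using List.reverseRecOn with
  | nil => rfl
  | append_singleton xs x ih =>
    rw [List.foldl_append]
    simp only [List.foldl_cons, List.foldl_nil]
    have hkeys : (xs.foldl (fun d n => d.insert n (F n)) PySem.Dict.empty).keys
        = PySem.Set.ofList xs := by
      rw [PySem.Dict.keys_foldl_insert]
      rfl
    by_cases hx : x ∈ xs
    · rw [PySem.Dict.items_insert_of_contains]
      · rw [ih]
        simp only [PySem.List.dedup_eq_ofList, PySem.Set.ofList_append_singleton,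
          PySem.Set.add]
        have hc : PySem.Set.contains (PySem.Set.ofList xs) x = true := by
          simp [PySem.Set.mem_ofList, hx]
        rw [hc]
        simp only [if_true, List.map_map]
        apply List.map_congr_left
        intro n _
        by_cases hnx : n = x
        · subst hnx; simp
        · simp [Function.comp, hnx]
      · rw [PySem.Dict.contains_iff_mem_keys, hkeys, PySem.Set.mem_ofList]
        exact hx
    · rw [PySem.Dict.items_insert_of_not_contains]
      · rw [ih]
        simp only [PySem.List.dedup_eq_ofList, PySem.Set.ofList_append_singleton,
          PySem.Set.add]
        have hc : PySem.Set.contains (PySem.Set.ofList xs) x = false := by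
          simp [PySem.Set.mem_ofList, hx]
        rw [hc]
        simp
      · rw [PySem.Dict.contains_eq_decide_mem_keys, hkeys]
        simp [PySem.Set.mem_ofList, hx]

-- B's pair-accumulator loop is a map plus a sum.
theorem foldl_pair_loop (C : Int → Int) (l : List Int) (ps : List (Int × Int)) (t : Int) :
    l.foldl (fun acc n => (acc.1 ++ [(n, C n)], acc.2 + C n)) (ps, t)
      = (ps ++ l.map (fun n => (n, C n)), t + (l.map C).sum) := by
  induction l generalizing ps t with
  | nil => simp
  | cons a rest ih => simp [List.foldl_cons, ih]; ring

theorem count_number_occurrences_spec : Claim_equal_count_number_occurrences := by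
  intro data sel _ _
  unfold Spec_count_number_occurrences count_number_occurrences count_number_occurrences_alt
  cases h : (PySem.Dict.ofList data).get? "value" with
  | none => rfl
  | some inner =>
    simp only
    have hA : (sel.foldl
        (fun d num =>
          d.insert num
            (((PySem.Dict.ofList inner).values.foldl
              (fun d amenities =>
                match amenities with
                | none => d
                | some ams => ams.foldl (fun d n => d.modify n 0 (· + 1)) d)
              (PySem.Dict.empty : PySem.Dict Int Int)).getD num 0))
        (PySem.Dict.empty : PySem.Dict Int Int))
        = sel.foldl (fun d n => d.insert n (((PySem.Dict.ofList inner).values.map (pvG n)).sum))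
            (PySem.Dict.empty : PySem.Dict Int Int) := by
      apply PySem.List.foldl_congr_mem
      intro d n _
      rw [counterA_getD]
      simp
    rw [hA,
      foldl_pair_loop (C := fun n => pvCountOne (PySem.Dict.ofList inner).values n)]
    have hC : ∀ n : Int, pvCountOne (PySem.Dict.ofList inner).values n
        = ((PySem.Dict.ofList inner).values.map (pvG n)).sum :=
      fun n => pvCountOne_eq _ n
    have hitems := items_foldl_insert_fn
      (fun n => ((PySem.Dict.ofList inner).values.map (pvG n)).sum) sel
    have hvalsum : (sel.foldl
        (fun d n => d.insert n (((PySem.Dict.ofList inner).values.map (pvG n)).sum))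
        (PySem.Dict.empty : PySem.Dict Int Int)).values
        = (PySem.List.dedup sel).map (fun n => ((PySem.Dict.ofList inner).values.map (pvG n)).sum) := by
      have hv : ∀ (d : PySem.Dict Int Int), d.values = d.items.map (fun p => p.2) := fun _ => rfl
      rw [hv, hitems, List.map_map]
      rfl
    rw [hitems, hvalsum]
    simp only [hC]
    simp
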